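-- pv_equiv track=rewrite | github.com/chbauman/play-along-react | mxlpy/repeat_analyzer.py | clear_repeats
-- ===== SOURCE A (Python) =====
-- from typing import List, Dict
--
-- def clear_repeats(indices: List[int]) -> List[int]:
--     rev_idx = []
--     curr_min = indices[-1] + 1
--     for idx in reversed(indices):
--         if idx < curr_min:
--             curr_min = idx
--             rev_idx.append(idx)
--
--     return list(reversed(rev_idx))
-- ===== SOURCE B (Python) =====
-- from typing import List
--
--
-- def clear_repeats(indices: List[int]) -> List[int]:
--     n = len(indices)
--     # suffix_min[i] = min of indices[i+1:], None when that slice is empty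
--     suffix_min = [None] * n
--     m = None
--     for i in range(n - 1, -1, -1):
--         suffix_min[i] = m
--         if m is None or indices[i] < m:
--             m = indices[i]
--     return [indices[i] for i in range(n)
--             if suffix_min[i] is None or indices[i] < suffix_min[i]]
-- ===== Notes on version B (the rewrite author's own statement) =====
-- stated objective: alternative
-- what changed: B precomputes a suffix-minimum array in one right-to-left pass and then selects elements in a forward pass, instead of A's single reversed loop that appends kept elements and reverses the result at the end.
import Mathlib
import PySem

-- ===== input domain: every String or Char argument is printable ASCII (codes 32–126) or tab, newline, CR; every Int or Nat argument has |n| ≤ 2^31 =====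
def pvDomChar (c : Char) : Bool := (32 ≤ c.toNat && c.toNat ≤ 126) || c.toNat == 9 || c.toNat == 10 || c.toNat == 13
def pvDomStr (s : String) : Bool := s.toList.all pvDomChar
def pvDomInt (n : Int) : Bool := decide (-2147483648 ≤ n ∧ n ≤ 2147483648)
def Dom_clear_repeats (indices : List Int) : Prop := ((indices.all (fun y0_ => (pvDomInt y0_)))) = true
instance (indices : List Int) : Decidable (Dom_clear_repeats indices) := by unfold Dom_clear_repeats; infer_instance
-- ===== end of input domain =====

-- B replaces A's reversed append-and-reverse loop by a suffix-minimum array pass plus a forward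
-- selection pass (alternative decomposition, same O(n) cost); Pre_ excludes the empty list, where A raises.


-- ===== PORT A =====
-- for idx in reversed(indices): if idx < curr_min: curr_min = idx; rev_idx.append(idx)
def clearStepA (st : List Int × Int) (idx : Int) : List Int × Int :=
  if idx < st.2 then (st.1 ++ [idx], idx) else st

def clear_repeats (indices : List Int) : List Int :=
  match PySem.List.pyGet? indices (-1) with   -- indices[-1]; none = IndexError (excluded by Pre_)
  | none => []
  | some last => ((indices.reverse).foldl clearStepA ([], last + 1)).1.reverse

-- ===== PORT B =====
-- right-to-left pass: returns (suffix_min array, running min m); suffix_min[i] = min of tail after i (none if empty)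
def sufMinB : List Int → List (Option Int) × Option Int
  | [] => ([], none)
  | x :: xs =>
    let (s, m) := sufMinB xs
    (m :: s, some (match m with | none => x | some v => if x < v then x else v))

def clear_repeats_alt (indices : List Int) : List Int :=
  let s := (sufMinB indices).1
  ((indices.zip s).filter (fun p =>
      match p.2 with | none => true | some v => decide (p.1 < v))).map Prod.fst

-- ===== PRECONDITION & SPEC =====
-- A evaluates indices[-1], which raises IndexError on the empty list; Pre_ excludes exactly that.
def Pre_clear_repeats (indices : List Int) : Prop := indices ≠ []
instance (indices : List Int) : Decidable (Pre_clear_repeats indices) := by unfold Pre_clear_repeats; infer_instance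
def pvWitness_clear_repeats : List Int := [3, 1, 4, 1, 5]

def Spec_clear_repeats (indices : List Int) (out : List Int) : Prop := out = clear_repeats_alt indices
instance (indices : List Int) (out : List Int) : Decidable (Spec_clear_repeats indices out) := by unfold Spec_clear_repeats; infer_instance

-- ===== CLAIM (what is proved, stated in full; the proofs are below) =====
def Claim_equal_clear_repeats : Prop := ∀ (indices : List Int), Dom_clear_repeats indices → Pre_clear_repeats indices → Spec_clear_repeats indices (clear_repeats indices)

-- ===== LEMMAS AND PROOFS =====

-- reference form: keep x iff x is strictly below every later element
def keepRef : List Int → List Int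
  | [] => []
  | x :: xs => if ∀ y ∈ xs, x < y then x :: keepRef xs else keepRef xs

-- the running min returned by sufMinB is a member of the list and a lower bound of it
lemma sufMinB_snd (l : List Int) :
    (l = [] ∧ (sufMinB l).2 = none) ∨
    (∃ v, (sufMinB l).2 = some v ∧ v ∈ l ∧ ∀ y ∈ l, v ≤ y) := by
  induction l with
  | nil => left; exact ⟨rfl, rfl⟩
  | cons x xs ih =>
    right
    rcases ih with ⟨hnil, hm⟩ | ⟨v, hv, hmem, hlb⟩
    · subst hnil
      exact ⟨x, by simp [sufMinB], by simp, by simp⟩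
    · refine ⟨if x < v then x else v, ?_, ?_, ?_⟩
      · simp [sufMinB, hv]
      · split_ifs with h
        · simp
        · simp [hmem]
      · intro y hy
        rcases List.mem_cons.mp hy with rfl | hy
        · split_ifs with h <;> omega
        · have := hlb y hy
          split_ifs with h <;> omega

-- B equals the reference form
lemma alt_eq_keepRef (l : List Int) : clear_repeats_alt l = keepRef l := by
  induction l with
  | nil => rfl
  | cons x xs ih =>
    have hz : (sufMinB (x :: xs)).1 = (sufMinB xs).2 :: (sufMinB xs).1 := by
      simp [sufMinB]
    show (((x :: xs).zip (sufMinB (x :: xs)).1).filter _).map Prod.fst = _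
    rw [hz]
    rcases sufMinB_snd xs with ⟨hnil, hm⟩ | ⟨v, hv, hmem, hlb⟩
    · subst hnil
      simp [keepRef, hm, clear_repeats_alt] at *
    · rw [hv]
      by_cases h : x < v
      · have hall : ∀ y ∈ xs, x < y := fun y hy => lt_of_lt_of_le h (hlb y hy)
        simp only [List.zip_cons_cons, List.filter_cons, keepRef, if_pos hall]
        simp only [h, decide_true]
        exact congrArg (x :: ·) ih
      · have hnot : ¬ ∀ y ∈ xs, x < y := fun hall => h (hall v hmem)
        simp only [List.zip_cons_cons, List.filter_cons, keepRef, if_neg hnot]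
        simp only [h, decide_false]
        exact ih

-- A's fold invariant: starting from a bound strictly above the last element, the fold over the
-- reversed list produces keepRef (reversed, as Python appends) and the running minimum of the list
lemma foldA_inv (l : List Int) (hl : l ≠ []) :
    ∃ m, ((l.reverse).foldl clearStepA ([], l.getLast hl + 1)) = ((keepRef l).reverse, m) ∧
      m ∈ l ∧ ∀ y ∈ l, m ≤ y := by
  induction l with
  | nil => exact absurd rfl hl
  | cons x xs ih =>
    rcases eq_or_ne xs [] with rfl | hxs
    · refine ⟨x, ?_, by simp, by simp⟩
      simp [clearStepA, keepRef]
    · obtain ⟨m, hfold, hmem, hlb⟩ := ih hxs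
      have hlast : (x :: xs).getLast hl = xs.getLast hxs := List.getLast_cons hxs
      have hrev : (x :: xs).reverse = xs.reverse ++ [x] := by simp
      rw [hrev, hlast, List.foldl_append, hfold]
      by_cases h : x < m
      · have hall : ∀ y ∈ xs, x < y := fun y hy => lt_of_lt_of_le h (hlb y hy)
        refine ⟨x, ?_, by simp, ?_⟩
        · simp only [List.foldl_cons, List.foldl_nil, clearStepA, if_pos h, keepRef, if_pos hall,
            List.reverse_cons]
        · intro y hy
          rcases List.mem_cons.mp hy with rfl | hy
          · exact le_refl _
          · exact le_of_lt (hall y hy)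
      · have hnot : ¬ ∀ y ∈ xs, x < y := fun hall => h (hall m hmem)
        refine ⟨m, ?_, List.mem_cons_of_mem _ hmem, ?_⟩
        · simp only [List.foldl_cons, List.foldl_nil, clearStepA, if_neg h, keepRef, if_neg hnot]
        · intro y hy
          rcases List.mem_cons.mp hy with rfl | hy
          · omega
          · exact hlb y hy

lemma A_eq_keepRef (l : List Int) (hl : l ≠ []) : clear_repeats l = keepRef l := by
  have hget : PySem.List.pyGet? l (-1) = some (l.getLast hl) := by
    rw [PySem.List.pyGet?_neg_one, List.getLast?_eq_getLast_of_ne_nil hl]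
  obtain ⟨m, hfold, -, -⟩ := foldA_inv l hl
  simp [clear_repeats, hget, hfold]

-- ===== VERDICT (by name: the statement is the Claim_ definition above) =====
theorem clear_repeats_spec : Claim_equal_clear_repeats := by
  intro indices _ hpre
  show clear_repeats indices = clear_repeats_alt indices
  rw [A_eq_keepRef indices hpre, alt_eq_keepRef]
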